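-- pv_equiv track=rewrite | github.com/alexandreleven/GPTChequers | backend/eleven/onyx/document_index/elasticsearch/shared_utils/elasticsearch_request_builders.py | extract_access_lists
-- ===== SOURCE A (Python) =====
-- from typing import List
-- from typing import Optional
--
-- def extract_access_lists(
--     site_library_access: Optional[List[List[str]]],
-- ) -> tuple[List[str], List[str]]:
--     """Extract site_users and drive_users from site_library_access data.
--
--     Args:
--         site_library_access: A list of [site, library] pairs representing access rights.
--
--     Returns:
--         A tuple of (site_users, drive_users) lists.
--     """
--     site_users = []
--     drive_users = []
--
--     if site_library_access:
--         for access_pair in site_library_access: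
--             if len(access_pair) == 2:
--                 site, library = access_pair
--                 site_users.append(site)
--                 drive_users.append(library)
--
--     # Remove duplicates while preserving order
--     site_users = list(dict.fromkeys(site_users))
--     drive_users = list(dict.fromkeys(drive_users))
--
--     return site_users, drive_users
-- ===== SOURCE B (Python) =====
-- def extract_access_lists(site_library_access):
--     rows = site_library_access or []
--
--     def column(i):
--         seen = set()
--         out = []
--         for p in rows:
--             if len(p) == 2:
--                 v = p[i]
--                 if v not in seen:
--                     seen.add(v)
--                     out.append(v)
--         return out
--
--     return column(0), column(1)
-- ===== Notes on version B (the rewrite author's own statement) =====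
-- stated objective: alternative
-- what changed: Instead of one simultaneous two-accumulator pass followed by dict.fromkeys dedup, B scans the rows twice (once per column) and fuses the order-preserving dedup into each scan with a membership set, so no dedup post-pass exists.
import Mathlib
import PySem

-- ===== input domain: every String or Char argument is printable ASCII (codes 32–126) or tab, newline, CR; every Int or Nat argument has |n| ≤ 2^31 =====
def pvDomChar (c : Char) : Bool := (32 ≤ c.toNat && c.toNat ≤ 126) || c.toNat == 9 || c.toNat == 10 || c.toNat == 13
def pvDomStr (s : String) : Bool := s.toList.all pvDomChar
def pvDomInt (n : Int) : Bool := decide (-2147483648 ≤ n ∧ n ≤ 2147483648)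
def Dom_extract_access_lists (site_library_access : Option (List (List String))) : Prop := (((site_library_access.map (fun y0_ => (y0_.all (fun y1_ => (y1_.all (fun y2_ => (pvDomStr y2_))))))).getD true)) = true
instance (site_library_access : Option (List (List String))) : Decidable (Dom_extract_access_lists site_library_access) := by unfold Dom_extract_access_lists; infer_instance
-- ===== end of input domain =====

-- B replaces A's simultaneous two-accumulator loop + dict.fromkeys dedup by two staged per-column scans with the dedup fused in via a seen-set; same return value.

-- ===== PORT A =====
-- loop body of A's for-loop (append to both accumulators when len == 2)
def pvStepA (acc : List String × List String) (access_pair : List String) : List String × List String :=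
  match access_pair with
  | [site, library] => (acc.1 ++ [site], acc.2 ++ [library])
  | _ => acc

def extract_access_lists (site_library_access : Option (List (List String))) : List String × List String :=
  -- site_users = []; drive_users = []; the for-loop appends to both when len(access_pair) == 2
  let acc :=
    match site_library_access with
    | none => (([] : List String), ([] : List String))
    | some xs =>
      if xs.isEmpty then (([] : List String), ([] : List String))  -- 'if site_library_access:' is falsy on [] too
      else xs.foldl pvStepA (([] : List String), ([] : List String))
  -- list(dict.fromkeys(·)) = ordered dedup
  (PySem.List.dedup acc.1, PySem.List.dedup acc.2)

-- ===== PORT B =====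
-- column(i): one pass over rows, appending p[i] of each length-2 row unless already in the seen set
def pvColumn (rows : List (List String)) (i : Int) : List String :=
  (rows.foldl
    (fun (st : PySem.Set String × List String) p =>
      if p.length == 2 then
        let v := (PySem.List.pyGet? p i).getD ""   -- p[i]; always in range here since len(p) == 2 and i ∈ {0,1}
        if PySem.Set.contains st.1 v then st
        else (PySem.Set.add st.1 v, st.2 ++ [v])
      else st)
    (PySem.Set.empty, [])).2

def extract_access_lists_alt (site_library_access : Option (List (List String))) : List String × List String :=
  let rows := site_library_access.getD []   -- site_library_access or []
  (pvColumn rows 0, pvColumn rows 1)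

-- ===== PRECONDITION & SPEC =====
def Spec_extract_access_lists (site_library_access : Option (List (List String))) (out : List String × List String) : Prop := out = extract_access_lists_alt site_library_access
instance (site_library_access : Option (List (List String))) (out : List String × List String) : Decidable (Spec_extract_access_lists site_library_access out) := by unfold Spec_extract_access_lists; infer_instance

-- ===== CLAIM (what is proved, stated in full; the proofs are below) =====
def Claim_equal_extract_access_lists : Prop := ∀ (site_library_access : Option (List (List String))), Dom_extract_access_lists site_library_access → Spec_extract_access_lists site_library_access (extract_access_lists site_library_access)

-- ===== LEMMAS AND PROOFS =====

-- the two columns of the length-2 rows, as projections (used only in proofs)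
def pvCol0 (xs : List (List String)) : List String :=
  (xs.filter (fun p => p.length == 2)).map (fun p => match p with | s :: _ => s | [] => "")
def pvCol1 (xs : List (List String)) : List String :=
  (xs.filter (fun p => p.length == 2)).map (fun p => match p with | _ :: l :: _ => l | _ => "")

-- A's fold with two append-accumulators equals the two projected columns.
theorem pv_fold_eq (xs : List (List String)) : ∀ (a b : List String),
    xs.foldl pvStepA (a, b) = (a ++ pvCol0 xs, b ++ pvCol1 xs) := by
  induction xs with
  | nil => simp [pvCol0, pvCol1]
  | cons p rest ih =>
    intro a b
    match p with
    | [] => simpa [pvStepA, pvCol0, pvCol1] using ih a b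
    | [s] => simpa [pvStepA, pvCol0, pvCol1] using ih a b
    | [s, l] => simp [List.foldl_cons, pvStepA, pvCol0, pvCol1, ih]
    | s :: l :: c :: t => simpa [pvStepA, pvCol0, pvCol1, List.filter_cons] using ih a b

-- B's fused scan, started with seen = out, keeps that invariant and performs Set.add on the column.
theorem pvColumn_fold0 (xs : List (List String)) : ∀ (o : List String),
    xs.foldl
      (fun (st : PySem.Set String × List String) p =>
        if p.length == 2 then
          let v := (PySem.List.pyGet? p 0).getD ""
          if PySem.Set.contains st.1 v then st
          else (PySem.Set.add st.1 v, st.2 ++ [v])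
        else st)
      (o, o)
    = ((pvCol0 xs).foldl PySem.Set.add o, (pvCol0 xs).foldl PySem.Set.add o) := by
  induction xs with
  | nil => simp [pvCol0]
  | cons p rest ih =>
    intro o
    match p with
    | [] => simpa [pvCol0] using ih o
    | [s] => simpa [pvCol0] using ih o
    | [s, l] =>
      simp only [List.foldl_cons, pvCol0, List.filter_cons]
      by_cases h : s ∈ o
      · simpa [PySem.List.pyGet?, PySem.List.pyIdx?, h, PySem.Set.add, PySem.Set.contains, pvCol0] using ih o
      · simpa [PySem.List.pyGet?, PySem.List.pyIdx?, h, PySem.Set.add, PySem.Set.contains, pvCol0] using ih (o ++ [s])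
    | s :: l :: c :: t => simpa [pvCol0, List.filter_cons] using ih o

theorem pvColumn_fold1 (xs : List (List String)) : ∀ (o : List String),
    xs.foldl
      (fun (st : PySem.Set String × List String) p =>
        if p.length == 2 then
          let v := (PySem.List.pyGet? p 1).getD ""
          if PySem.Set.contains st.1 v then st
          else (PySem.Set.add st.1 v, st.2 ++ [v])
        else st)
      (o, o)
    = ((pvCol1 xs).foldl PySem.Set.add o, (pvCol1 xs).foldl PySem.Set.add o) := by
  induction xs with
  | nil => simp [pvCol1]
  | cons p rest ih =>
    intro o
    match p with
    | [] => simpa [pvCol1] using ih o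
    | [s] => simpa [pvCol1] using ih o
    | [s, l] =>
      simp only [List.foldl_cons, pvCol1, List.filter_cons]
      by_cases h : l ∈ o
      · simpa [PySem.List.pyGet?, PySem.List.pyIdx?, h, PySem.Set.add, PySem.Set.contains, pvCol1] using ih o
      · simpa [PySem.List.pyGet?, PySem.List.pyIdx?, h, PySem.Set.add, PySem.Set.contains, pvCol1] using ih (o ++ [l])
    | s :: l :: c :: t => simpa [pvCol1, List.filter_cons] using ih o

theorem pvColumn0_eq (xs : List (List String)) : pvColumn xs 0 = PySem.List.dedup (pvCol0 xs) := by
  unfold pvColumn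
  rw [show (PySem.Set.empty, ([] : List String)) = (([] : List String), ([] : List String)) from rfl,
      pvColumn_fold0]
  simp [PySem.List.dedup_eq_ofList, PySem.Set.ofList_eq_foldl]

theorem pvColumn1_eq (xs : List (List String)) : pvColumn xs 1 = PySem.List.dedup (pvCol1 xs) := by
  unfold pvColumn
  rw [show (PySem.Set.empty, ([] : List String)) = (([] : List String), ([] : List String)) from rfl,
      pvColumn_fold1]
  simp [PySem.List.dedup_eq_ofList, PySem.Set.ofList_eq_foldl]

theorem extract_access_lists_eq (o : Option (List (List String))) :
    extract_access_lists o = extract_access_lists_alt o := by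
  unfold extract_access_lists extract_access_lists_alt
  cases o with
  | none => simp [pvColumn]
  | some xs =>
    simp only [Option.getD, pvColumn0_eq, pvColumn1_eq]
    by_cases h : xs.isEmpty
    · simp [List.isEmpty_iff.mp h, pvCol0, pvCol1]
    · rw [if_neg h, pv_fold_eq xs [] []]
      simp

-- ===== VERDICT (by name: the statement is the Claim_ definition above) =====
theorem extract_access_lists_spec : Claim_equal_extract_access_lists := by
  intro o _
  exact extract_access_lists_eq o
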